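-- pv_equiv track=rewrite | github.com/sabaa/pytation-anonymized | mutation_testing/mutation_operators/utils.py | find_shared_members
-- ===== SOURCE A (Python) =====
-- def find_shared_members(parents_data, child_dict, child_obj):
--
--     inherited_methods = {}
--     for method, source in child_dict.items():
--         if source != child_obj:
--             inherited_methods[method] = source
--     shared_methods = []
--     for method, source in inherited_methods.items():
--         for parent, parent_dict in parents_data.items():
--             for par_method, par_source in parent_dict.items():
--                 # if parent has the method
--                 if par_method == method:
--                     shared_methods.append((method, parent, par_source))
--
--     result = []
--     for i in range(len(shared_methods)):
--         method_i, parent_i, source_i = shared_methods[i]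
--         for j in range(i + 1, len(shared_methods)):
--             method_j, parent_j, source_j = shared_methods[j]
--             if method_i == method_j and source_i != source_j and parent_i != parent_j:
--                 result.append(method_i)
--     return result
-- ===== SOURCE B (Python) =====
-- def find_shared_members(parents_data, child_dict, child_obj):
--     result = []
--     for method, source in child_dict.items():
--         if source == child_obj:
--             continue
--         # sources of this method in each parent that defines it (one per parent)
--         sources = [pd[method] for pd in parents_data.values() if method in pd]
--         count = 0
--         seen = {}
--         for idx, src in enumerate(sources):
--             count += idx - seen.get(src, 0)
--             seen[src] = seen.get(src, 0) + 1
--         result.extend([method] * count)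
--     return result
-- ===== Notes on version B (the rewrite author's own statement) =====
-- stated objective: faster
-- what changed: A builds one flat list of (method, parent, source) triples over all inherited methods and runs a single O(S^2) all-pairs index scan with a method==method guard; B processes each inherited method separately, collecting that method's parent sources once and counting differing-source pairs in one linear pass with a running counter dict, so no cross-method comparisons and no index arithmetic remain.
import Mathlib
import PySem

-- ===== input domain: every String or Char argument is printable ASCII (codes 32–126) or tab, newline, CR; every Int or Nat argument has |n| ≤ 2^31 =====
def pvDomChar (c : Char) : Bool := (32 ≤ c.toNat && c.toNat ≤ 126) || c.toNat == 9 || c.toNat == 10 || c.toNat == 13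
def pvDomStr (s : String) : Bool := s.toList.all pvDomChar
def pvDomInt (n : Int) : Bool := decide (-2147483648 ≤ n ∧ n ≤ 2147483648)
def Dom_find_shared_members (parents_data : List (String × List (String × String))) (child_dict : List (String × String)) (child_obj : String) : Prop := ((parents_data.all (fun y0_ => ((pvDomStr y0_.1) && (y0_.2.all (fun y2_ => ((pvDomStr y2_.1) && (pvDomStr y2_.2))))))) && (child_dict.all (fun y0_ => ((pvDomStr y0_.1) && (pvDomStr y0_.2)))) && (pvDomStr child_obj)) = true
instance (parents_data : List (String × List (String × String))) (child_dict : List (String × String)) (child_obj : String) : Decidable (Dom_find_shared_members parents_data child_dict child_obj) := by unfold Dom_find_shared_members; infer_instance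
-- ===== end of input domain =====

-- B replaces A's flat quadratic scan over all (method, parent, source) triples by a per-method
-- group: for each inherited method it collects the parents' sources once and counts the
-- differing-source pairs in one linear pass with a running counter dict (objective: faster).

-- ===== PORT A =====
def find_shared_members (parents_data : List (String × List (String × String))) (child_dict : List (String × String)) (child_obj : String) : List String :=
  let inherited : PySem.Dict String String :=
    child_dict.foldl (fun d ms => if ms.2 != child_obj then d.insert ms.1 ms.2 else d) PySem.Dict.empty
  let shared : List (String × String × String) :=
    inherited.items.foldl (fun acc ms =>
      parents_data.foldl (fun acc pp =>
        pp.2.foldl (fun acc q =>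
          if q.1 == ms.1 then acc ++ [(ms.1, pp.1, q.2)] else acc) acc) acc) []
  (PySem.List.pyRange 0 (shared.length : Int)).foldl (fun res i =>
    let ti := PySem.List.pyGetD shared i ("", "", "")
    (PySem.List.pyRange (i + 1) (shared.length : Int)).foldl (fun res j =>
      let tj := PySem.List.pyGetD shared j ("", "", "")
      if ti.1 == tj.1 && ti.2.2 != tj.2.2 && ti.2.1 != tj.2.1 then res ++ [ti.1] else res) res) []

-- ===== PORT B =====
def find_shared_members_alt (parents_data : List (String × List (String × String))) (child_dict : List (String × String)) (child_obj : String) : List String :=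
  child_dict.foldl (fun result ms =>
    if ms.2 == child_obj then result
    else
      let sources : List String := parents_data.filterMap (fun pp => (PySem.Dict.mk pp.2).get? ms.1)
      let fin := (PySem.List.enumerate sources 0).foldl
        (fun (st : Int × PySem.Dict String Int) e =>
          (st.1 + e.1 - st.2.getD e.2 0, st.2.insert e.2 (st.2.getD e.2 0 + 1)))
        (0, PySem.Dict.empty)
      result ++ List.replicate fin.1.toNat ms.1) []

-- ===== PRECONDITION & SPEC =====
-- Pre_ excludes association lists with duplicate keys (in child_dict, in parents_data, or in a
-- parent's dict): the Python arguments are dicts, whose keys are necessarily distinct, so such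
-- lists do not represent any input the Python function can receive.
def Pre_find_shared_members (parents_data : List (String × List (String × String))) (child_dict : List (String × String)) (child_obj : String) : Prop :=
  (child_dict.map Prod.fst).Nodup ∧ (parents_data.map Prod.fst).Nodup ∧
    ∀ pp ∈ parents_data, (pp.2.map Prod.fst).Nodup
instance (parents_data : List (String × List (String × String))) (child_dict : List (String × String)) (child_obj : String) : Decidable (Pre_find_shared_members parents_data child_dict child_obj) := by unfold Pre_find_shared_members; infer_instance

def pvWitness_find_shared_members : (List (String × List (String × String))) × (List (String × String)) × String :=
  ([("P", [("m", "s1")]), ("Q", [("m", "s2")])], [("m", "s0")], "C")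

def Spec_find_shared_members (parents_data : List (String × List (String × String))) (child_dict : List (String × String)) (child_obj : String) (out : List String) : Prop := out = find_shared_members_alt parents_data child_dict child_obj
instance (parents_data : List (String × List (String × String))) (child_dict : List (String × String)) (child_obj : String) (out : List String) : Decidable (Spec_find_shared_members parents_data child_dict child_obj out) := by unfold Spec_find_shared_members; infer_instance

-- ===== CLAIM (what is proved, stated in full; the proofs are below) =====
def Claim_equal_find_shared_members : Prop := ∀ (parents_data : List (String × List (String × String))) (child_dict : List (String × String)) (child_obj : String), Dom_find_shared_members parents_data child_dict child_obj → Pre_find_shared_members parents_data child_dict child_obj → Spec_find_shared_members parents_data child_dict child_obj (find_shared_members parents_data child_dict child_obj)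

-- ===== LEMMAS AND PROOFS =====

-- A's flat i<j scan, written as structural recursion (contribution of each element with its suffix)
def pvScan : List (String × String × String) → List String
  | [] => []
  | x :: t => (t.filter (fun y => x.1 == y.1 && x.2.2 != y.2.2 && x.2.1 != y.2.1)).map (fun _ => x.1) ++ pvScan t

-- number of i<j pairs with different entries, via each element and its suffix
def pvCnt : List String → Nat
  | [] => 0
  | s :: t => t.countP (fun y => s != y) + pvCnt t

-- A's per-method triple group
def pvE (parents_data : List (String × List (String × String))) (m : String) : List (String × String × String) :=
  parents_data.flatMap (fun pp => (pp.2.filter (fun q => q.1 == m)).map (fun q => (m, pp.1, q.2)))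

-- B's per-method (parent, source) group
def pvGrp (parents_data : List (String × List (String × String))) (m : String) : List (String × String) :=
  parents_data.filterMap (fun pp => ((PySem.Dict.mk pp.2).get? m).map (fun v => (pp.1, v)))

lemma pvE_fst (pd : List (String × List (String × String))) (m : String) :
    ∀ x ∈ pvE pd m, x.1 = m := by
  intro x hx
  simp only [pvE, List.mem_flatMap, List.mem_map] at hx
  obtain ⟨pp, _, q, _, rfl⟩ := hx
  rfl

lemma pvScan_append (xs ys : List (String × String × String))
    (h : ∀ x ∈ xs, ∀ y ∈ ys, (x.1 == y.1 && x.2.2 != y.2.2 && x.2.1 != y.2.1) = false) :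
    pvScan (xs ++ ys) = pvScan xs ++ pvScan ys := by
  induction xs with
  | nil => simp [pvScan]
  | cons x t ih =>
    have hy : ys.filter (fun y => x.1 == y.1 && x.2.2 != y.2.2 && x.2.1 != y.2.1) = [] :=
      List.filter_eq_nil_iff.2 (fun y hyy => by simp [h x List.mem_cons_self y hyy])
    simp only [List.cons_append, pvScan, List.filter_append, hy, List.append_nil]
    rw [ih (fun a ha => h a (List.mem_cons_of_mem _ ha)), List.append_assoc]

lemma pvScan_flatMap (l : List (String × String)) (pd : List (String × List (String × String)))
    (hnd : (l.map Prod.fst).Nodup) :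
    pvScan (l.flatMap (fun ms => pvE pd ms.1)) = l.flatMap (fun ms => pvScan (pvE pd ms.1)) := by
  induction l with
  | nil => simp [pvScan]
  | cons ms t ih =>
    have h0 : ms.1 ∉ t.map Prod.fst := by simpa using (List.nodup_cons.1 hnd).1
    rw [List.flatMap_cons, List.flatMap_cons,
      pvScan_append _ _ ?hcross, ih ((List.nodup_cons.1 hnd).2)]
    case hcross =>
      intro x hx y hy
      obtain ⟨ms', hms', hy'⟩ := List.mem_flatMap.1 hy
      have hne : x.1 ≠ y.1 := by
        rw [pvE_fst pd ms.1 x hx, pvE_fst pd ms'.1 y hy']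
        intro he; exact h0 (he ▸ (List.mem_map_of_mem hms' : ms'.1 ∈ t.map Prod.fst))
      simp [hne]

lemma pv_filter_key_nodup (l : List (String × String)) (m : String) (h : (l.map Prod.fst).Nodup) :
    l.filter (fun q => q.1 == m) = ((PySem.Dict.mk l).get? m).toList.map (fun v => (m, v)) := by
  induction l with
  | nil => simp [PySem.Dict.get?]
  | cons q rest ih =>
    obtain ⟨k, v⟩ := q
    rw [List.filter_cons, PySem.Dict.get?_mk_cons]
    have h' : k ∉ rest.map Prod.fst ∧ (rest.map Prod.fst).Nodup := by
      rw [List.map_cons, List.nodup_cons] at h; exact h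
    by_cases hk : k == m
    · have hkm : k = m := by simpa using hk
      subst hkm
      have hrest : rest.filter (fun q => q.1 == k) = [] := by
        apply List.filter_eq_nil_iff.2
        intro a ha hc
        have ha1 : a.1 = k := by simpa using hc
        exact h'.1 (ha1 ▸ (List.mem_map_of_mem ha : a.1 ∈ rest.map Prod.fst))
      simp [hrest]
    · have hkf : (k == m) = false := by simpa using hk
      simp only [hkf, Bool.false_eq_true, if_false]
      exact ih h'.2

lemma pvE_eq_grp (pd : List (String × List (String × String))) (m : String)
    (h : ∀ pp ∈ pd, (pp.2.map Prod.fst).Nodup) :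
    pvE pd m = (pvGrp pd m).map (fun ps => (m, ps.1, ps.2)) := by
  induction pd with
  | nil => simp [pvE, pvGrp]
  | cons pp t ih =>
    rw [pvE, List.flatMap_cons, pvGrp, List.filterMap_cons, ← pvE, ← pvGrp,
      ih (fun a ha => h a (List.mem_cons_of_mem _ ha)),
      pv_filter_key_nodup pp.2 m (h pp List.mem_cons_self)]
    cases hg : (PySem.Dict.mk pp.2).get? m with
    | none => simp
    | some v => simp

lemma pvGrp_fst_sublist (pd : List (String × List (String × String))) (m : String) :
    ((pvGrp pd m).map Prod.fst).Sublist (pd.map Prod.fst) := by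
  induction pd with
  | nil => simp [pvGrp]
  | cons pp t ih =>
    unfold pvGrp at ih ⊢
    rw [List.filterMap_cons, List.map_cons]
    cases hg : (PySem.Dict.mk pp.2).get? m with
    | none => exact ih.cons pp.1
    | some v => simpa [hg] using ih.cons₂ pp.1

lemma pvGrp_snd (pd : List (String × List (String × String))) (m : String) :
    (pvGrp pd m).map Prod.snd = pd.filterMap (fun pp => (PySem.Dict.mk pp.2).get? m) := by
  induction pd with
  | nil => simp [pvGrp]
  | cons pp t ih =>
    unfold pvGrp at ih ⊢
    rw [List.filterMap_cons, List.filterMap_cons]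
    cases hg : (PySem.Dict.mk pp.2).get? m with
    | none => simpa using ih
    | some v => simp only [Option.map_some, List.map_cons, ih]

lemma pvScan_group (g : List (String × String)) (m : String) (hp : (g.map Prod.fst).Nodup) :
    pvScan (g.map (fun ps => (m, ps.1, ps.2))) = List.replicate (pvCnt (g.map Prod.snd)) m := by
  induction g with
  | nil => simp [pvScan, pvCnt]
  | cons x t ih =>
    have h0 : x.1 ∉ t.map Prod.fst := by simpa using (List.nodup_cons.1 hp).1
    rw [List.map_cons, pvScan, List.map_cons, pvCnt, List.filter_map,
      ih (List.nodup_cons.1 hp).2]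
    have hf : List.filter
        ((fun y => ((m, x.1, x.2) : String × String × String).1 == y.1 &&
            (m, x.1, x.2).2.2 != y.2.2 && (m, x.1, x.2).2.1 != y.2.1) ∘ fun ps => (m, ps.1, ps.2)) t
        = List.filter (fun b => x.2 != b.2) t := by
      apply List.filter_congr
      intro b hb
      have hne : x.1 ≠ b.1 := fun he => h0 (he ▸ (List.mem_map_of_mem hb : b.1 ∈ t.map Prod.fst))
      simp [Function.comp, hne]
    rw [hf, List.map_map, List.replicate_add]
    congr 1
    rw [show (((fun _ => m) : String × String × String → String) ∘
        fun ps : String × String => (m, ps.1, ps.2)) = fun _ => m from rfl]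
    rw [List.map_const', List.countP_map]
    rw [show ((fun y => x.2 != y) ∘ (Prod.snd : String × String → String))
        = fun b : String × String => x.2 != b.2 from rfl]
    rw [List.countP_eq_length_filter]

lemma pvCnt_concat (p : List String) (x : String) :
    pvCnt (p ++ [x]) = pvCnt p + p.countP (fun y => y != x) := by
  induction p with
  | nil => simp [pvCnt]
  | cons a p' ih =>
    simp only [List.cons_append, pvCnt, ih, List.countP_append, List.countP_cons, List.countP_nil]
    omega

lemma pv_countP_bne (p : List String) (x : String) :
    p.countP (fun y => y != x) = p.length - p.count x := by
  have h : p.length = p.countP (fun a => a == x) + p.countP (fun a => decide ¬((a == x) = true)) :=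
    List.length_eq_countP_add_countP _
  have he : p.countP (fun y => y != x) = p.countP (fun a => decide ¬((a == x) = true)) :=
    List.countP_congr (by intro a _; simp [bne])
  rw [List.count_eq_countP, he]
  omega

lemma pv_run_eq (s : List String) :
    (PySem.List.enumerate s 0).foldl
        (fun (st : Int × PySem.Dict String Int) e =>
          (st.1 + e.1 - st.2.getD e.2 0, st.2.insert e.2 (st.2.getD e.2 0 + 1)))
        (0, PySem.Dict.empty)
      = ((pvCnt s : Int), s.foldl (fun d x => d.insert x (d.getD x 0 + 1)) PySem.Dict.empty) := by
  induction s using List.reverseRecOn with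
  | nil => simp [pvCnt]
  | append_singleton p x ih =>
    rw [PySem.List.enumerate_append, List.foldl_append, ih, PySem.List.enumerate_cons,
      PySem.List.enumerate_nil, List.foldl_cons, List.foldl_nil, List.foldl_append]
    simp only [List.foldl_cons, List.foldl_nil, PySem.Dict.getD_foldl_insert_add_one,
      PySem.Dict.getD_empty, pvCnt_concat, pv_countP_bne]
    have hcl := List.count_le_length (a := x) (l := p)
    simp only [Prod.mk.injEq]
    refine ⟨?_, by first | rfl | trivial⟩
    push_cast [Nat.cast_sub hcl]
    ring

lemma pv_natScan (xs : List (String × String × String)) :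
    (List.range xs.length).flatMap (fun k =>
        ((xs.drop (k+1)).filter (fun y =>
            (xs.getD k ("", "", "")).1 == y.1 && (xs.getD k ("", "", "")).2.2 != y.2.2 &&
              (xs.getD k ("", "", "")).2.1 != y.2.1)).map (fun _ => (xs.getD k ("", "", "")).1))
      = pvScan xs := by
  induction xs with
  | nil => simp [pvScan]
  | cons x t ih =>
    rw [List.length_cons, List.range_succ_eq_map, List.flatMap_cons, List.flatMap_map]
    simp only [List.getD_cons_zero, List.getD_cons_succ, Nat.succ_eq_add_one,
      List.drop_succ_cons]
    rw [pvScan, ← ih]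
    simp

lemma pv_flatMap_ite {α β : Type} (l : List α) (p : α → Bool) (g : α → List β) :
    l.flatMap (fun x => if p x then [] else g x) = (l.filter (fun x => !p x)).flatMap g := by
  induction l with
  | nil => simp
  | cons a t ih =>
    by_cases hp : p a <;> simp [hp, ih]

lemma pvLoop (xs : List (String × String × String)) :
    (PySem.List.pyRange 0 (xs.length : Int)).foldl (fun res i =>
      (PySem.List.pyRange (i + 1) (xs.length : Int)).foldl (fun res j =>
        if (PySem.List.pyGetD xs i ("", "", "")).1 == (PySem.List.pyGetD xs j ("", "", "")).1 &&
            (PySem.List.pyGetD xs i ("", "", "")).2.2 != (PySem.List.pyGetD xs j ("", "", "")).2.2 &&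
            (PySem.List.pyGetD xs i ("", "", "")).2.1 != (PySem.List.pyGetD xs j ("", "", "")).2.1
          then res ++ [(PySem.List.pyGetD xs i ("", "", "")).1] else res) res) []
    = pvScan xs := by
  rw [PySem.List.foldl_congr_mem _ _ (fun res i => res ++
      ((xs.drop (i + 1).toNat).filter (fun y =>
          (PySem.List.pyGetD xs i ("", "", "")).1 == y.1 &&
            (PySem.List.pyGetD xs i ("", "", "")).2.2 != y.2.2 &&
            (PySem.List.pyGetD xs i ("", "", "")).2.1 != y.2.1)).map
        (fun _ => (PySem.List.pyGetD xs i ("", "", "")).1)) _ ?hcm]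
  case hcm =>
    intro res i hi
    have h0 : (0 : Int) ≤ i + 1 := by
      have := (PySem.List.mem_pyRange_one.1 hi).1; omega
    have h2 := PySem.List.foldl_pyRange_pyGetD' xs ("", "", "")
      (fun res y => if (PySem.List.pyGetD xs i ("", "", "")).1 == y.1 &&
          (PySem.List.pyGetD xs i ("", "", "")).2.2 != y.2.2 &&
          (PySem.List.pyGetD xs i ("", "", "")).2.1 != y.2.1
        then res ++ [(PySem.List.pyGetD xs i ("", "", "")).1] else res) res h0
    exact h2.trans (PySem.List.foldl_append_if _ _ _ _)
  rw [PySem.List.foldl_append_eq_flatMap, List.nil_append, PySem.List.pyRange_one]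
  rw [List.flatMap_map]
  simp only [Int.sub_zero, Int.toNat_natCast, zero_add, PySem.List.pyGetD_natCast]
  have hcast : ∀ k : Nat, ((k : Int) + 1).toNat = k + 1 := by intro k; omega
  simp only [hcast]
  exact pv_natScan xs

lemma pvA_shape (pd : List (String × List (String × String))) (cd : List (String × String)) (co : String)
    (h1 : (cd.map Prod.fst).Nodup) :
    find_shared_members pd cd co
      = pvScan ((cd.filter (fun ms => ms.2 != co)).flatMap (fun ms => pvE pd ms.1)) := by
  have hitems : (cd.foldl (fun d ms => if ms.2 != co then d.insert ms.1 ms.2 else d)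
      (PySem.Dict.empty : PySem.Dict String String)).items = cd.filter (fun ms => ms.2 != co) := by
    rw [← List.foldl_filter]
    rw [PySem.Dict.items_foldl_insert_fresh _ Prod.fst Prod.snd _
      (fun a _ => PySem.Dict.contains_empty _)
      ((List.Sublist.map Prod.fst List.filter_sublist).nodup h1)]
    simp [show (PySem.Dict.empty : PySem.Dict String String).items = [] from rfl]
  simp only [find_shared_members]
  rw [hitems]
  have hsh : (cd.filter (fun ms => ms.2 != co)).foldl (fun acc ms =>
        pd.foldl (fun acc pp =>
          pp.2.foldl (fun acc q =>
            if q.1 == ms.1 then acc ++ [(ms.1, pp.1, q.2)] else acc) acc) acc)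
      ([] : List (String × String × String))
      = (cd.filter (fun ms => ms.2 != co)).flatMap (fun ms => pvE pd ms.1) := by
    simp only [PySem.List.foldl_append_if, PySem.List.foldl_append_eq_flatMap]
    simp [pvE]
  rw [hsh]
  exact pvLoop _

lemma pvB_shape (pd : List (String × List (String × String))) (cd : List (String × String)) (co : String) :
    find_shared_members_alt pd cd co
      = (cd.filter (fun ms => ms.2 != co)).flatMap (fun ms =>
          List.replicate (pvCnt (pd.filterMap (fun pp => (PySem.Dict.mk pp.2).get? ms.1))) ms.1) := by
  simp only [find_shared_members_alt, pv_run_eq, Int.toNat_natCast]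
  rw [PySem.List.foldl_congr_mem _ _ (fun result ms => result ++
      if ms.2 == co then [] else
        List.replicate (pvCnt (pd.filterMap fun pp => (PySem.Dict.mk pp.2).get? ms.1)) ms.1) _
    (by intro acc ms _; by_cases hc : ms.2 == co <;> simp [hc])]
  rw [PySem.List.foldl_append_eq_flatMap, List.nil_append, pv_flatMap_ite]
  simp [bne]


-- ===== VERDICT (by name: the statement is the Claim_ definition above) =====
theorem find_shared_members_spec : Claim_equal_find_shared_members := by
  intro pd cd co _ hpre
  obtain ⟨h1, h2, h3⟩ := hpre
  unfold Spec_find_shared_members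
  rw [pvA_shape pd cd co h1, pvB_shape]
  have hnd : ((cd.filter (fun ms => ms.2 != co)).map Prod.fst).Nodup :=
    (List.Sublist.map Prod.fst List.filter_sublist).nodup h1
  rw [pvScan_flatMap _ pd hnd]
  apply List.flatMap_congr
  intro ms hms
  rw [pvE_eq_grp pd ms.1 h3,
    pvScan_group _ _ ((pvGrp_fst_sublist pd ms.1).nodup h2), pvGrp_snd]
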